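-- pv_equiv track=rewrite | github.com/RyanSavoia/draftkings-prop-scraper | app.py | get_top_props_by_sport
-- ===== SOURCE A (Python) =====
-- def get_top_props_by_sport(props, limit=10):
--    """Get top props grouped by sport"""
--    sports_props = {}
--
--    for prop in props:
--        sport = prop['sport']
--        if sport not in sports_props:
--            sports_props[sport] = []
--        sports_props[sport].append(prop)
--
--    # Limit each sport to top N props
--    for sport in sports_props:
--        sports_props[sport] = sports_props[sport][:limit]
--
--    return sports_props
-- ===== SOURCE B (Python) =====
-- def get_top_props_by_sport(props, limit=10):
--     """Get top props grouped by sport"""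
--     sports = list(dict.fromkeys(prop['sport'] for prop in props))
--     return {sport: [p for p in props if p['sport'] == sport][:limit]
--             for sport in sports}
-- ===== Notes on version B (the rewrite author's own statement) =====
-- stated objective: simpler
-- what changed: Replaces the build-a-dict-of-buckets-then-truncate-each-bucket two-loop version by a dict comprehension: dedup the sports in first-appearance order, then for each sport filter-and-slice the props directly.
import Mathlib
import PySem

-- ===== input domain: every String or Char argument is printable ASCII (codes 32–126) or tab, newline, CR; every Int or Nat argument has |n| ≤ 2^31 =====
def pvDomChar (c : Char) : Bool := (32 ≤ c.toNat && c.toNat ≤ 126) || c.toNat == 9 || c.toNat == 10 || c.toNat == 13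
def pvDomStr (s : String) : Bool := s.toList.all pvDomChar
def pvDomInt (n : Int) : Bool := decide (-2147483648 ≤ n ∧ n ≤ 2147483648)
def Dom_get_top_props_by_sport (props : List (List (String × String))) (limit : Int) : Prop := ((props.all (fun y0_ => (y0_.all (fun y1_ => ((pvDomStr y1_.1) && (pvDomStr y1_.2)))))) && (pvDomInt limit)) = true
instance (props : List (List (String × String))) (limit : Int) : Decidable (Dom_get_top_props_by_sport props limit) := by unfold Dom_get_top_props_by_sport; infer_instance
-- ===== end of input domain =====

-- B replaces A's two loops (group into dict buckets, then truncate each bucket) by a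
-- dict comprehension over the deduped sport list, filtering-and-slicing props per sport (objective: simpler).


-- ===== PORT A =====
-- prop['sport'] (first matching key of the association list; "" only outside Pre_, where Python raises KeyError)
def pvSport (prop : List (String × String)) : String :=
  ((prop.find? (fun kv => kv.1 == "sport")).map Prod.snd).getD ""

def get_top_props_by_sport (props : List (List (String × String))) (limit : Int) : List (String × List (List (String × String))) :=
  let sports_props := props.foldl (fun d prop =>
    let sport := pvSport prop
    let d := if (d.find? (fun kv => kv.1 == sport)).isSome then d
             else d ++ [(sport, ([] : List (List (String × String))))]
    d.map (fun kv => if kv.1 == sport then (kv.1, kv.2 ++ [prop]) else kv)) []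
  sports_props.map (fun kv => (kv.1, PySem.List.slice kv.2 none (some limit)))

-- ===== PORT B =====
def get_top_props_by_sport_alt (props : List (List (String × String))) (limit : Int) : List (String × List (List (String × String))) :=
  let sports := PySem.List.dedup (props.map pvSport)
  sports.map (fun s => (s, PySem.List.slice (props.filter (fun p => pvSport p == s)) none (some limit)))

-- ===== PRECONDITION & SPEC =====
-- Pre_: every prop has a 'sport' key; otherwise Python A (and B) raises KeyError.
def Pre_get_top_props_by_sport (props : List (List (String × String))) (limit : Int) : Prop :=
  ∀ p ∈ props, (p.find? (fun kv => kv.1 == "sport")).isSome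
instance (props : List (List (String × String))) (limit : Int) : Decidable (Pre_get_top_props_by_sport props limit) := by unfold Pre_get_top_props_by_sport; infer_instance

def pvWitness_get_top_props_by_sport : (List (List (String × String))) × Int :=
  ([[("sport", "nba"), ("name", "pts")], [("sport", "mlb")], [("sport", "nba")]], 1)

def Spec_get_top_props_by_sport (props : List (List (String × String))) (limit : Int) (out : List (String × List (List (String × String)))) : Prop := out = get_top_props_by_sport_alt props limit
instance (props : List (List (String × String))) (limit : Int) (out : List (String × List (List (String × String)))) : Decidable (Spec_get_top_props_by_sport props limit out) := by unfold Spec_get_top_props_by_sport; infer_instance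

-- ===== CLAIM (what is proved, stated in full; the proofs are below) =====
def Claim_equal_get_top_props_by_sport : Prop := ∀ (props : List (List (String × String))) (limit : Int), Dom_get_top_props_by_sport props limit → Pre_get_top_props_by_sport props limit → Spec_get_top_props_by_sport props limit (get_top_props_by_sport props limit)

-- ===== LEMMAS AND PROOFS =====

-- A's first loop builds exactly: for each sport in first-appearance order, the sublist of props with that sport.
lemma pv_foldA_eq (props : List (List (String × String))) :
    props.foldl (fun d prop =>
      let sport := pvSport prop
      let d := if (d.find? (fun kv => kv.1 == sport)).isSome then d
               else d ++ [(sport, ([] : List (List (String × String))))]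
      d.map (fun kv => if kv.1 == sport then (kv.1, kv.2 ++ [prop]) else kv)) [] =
    (PySem.List.dedup (props.map pvSport)).map
      (fun s => (s, props.filter (fun p => pvSport p == s))) := by
  induction props using List.reverseRecOn with
  | nil => rfl
  | append_singleton ps p ih =>
    rw [List.foldl_append, ih]
    simp only [List.foldl_cons, List.foldl_nil, List.map_append, List.map_cons, List.map_nil,
      List.filter_append, PySem.List.dedup_eq_ofList, PySem.Set.ofList_append_singleton,
      PySem.Set.add_eq_ite, PySem.Set.mem_ofList]
    by_cases hp : pvSport p ∈ ps.map pvSport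
    · have hfind : (((PySem.Set.ofList (ps.map pvSport)).map
          (fun s => (s, ps.filter (fun q => pvSport q == s)))).find?
          (fun kv => kv.1 == pvSport p)).isSome := by
        rw [List.find?_isSome]
        exact ⟨(pvSport p, ps.filter (fun q => pvSport q == pvSport p)),
          List.mem_map_of_mem (by simpa [PySem.Set.mem_ofList] using hp), by simp⟩
      rw [if_pos hp, if_pos hfind, List.map_map]
      apply List.map_congr_left
      intro s hs
      by_cases hse : s = pvSport p
      · subst hse; simp [Function.comp, List.filter]
      · have h1 : (pvSport p == s) = false := beq_eq_false_iff_ne.mpr (Ne.symm hse)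
        simp [Function.comp, List.filter, hse, beq_iff_eq, h1]
    · have hfind : (((PySem.Set.ofList (ps.map pvSport)).map
          (fun s => (s, ps.filter (fun q => pvSport q == s)))).find?
          (fun kv => kv.1 == pvSport p)) = none := by
        rw [List.find?_eq_none]
        rintro ⟨s, l⟩ hmem
        obtain ⟨s', hs', heq⟩ := List.mem_map.mp hmem
        obtain ⟨rfl, -⟩ := Prod.mk.injEq .. ▸ heq
        simp only [beq_iff_eq]
        intro hcontra
        exact hp (by simpa [PySem.Set.mem_ofList, hcontra] using hs')
      rw [if_neg hp, hfind]
      simp only [Option.isSome_none, Bool.false_eq_true, if_false, List.map_append, List.map_map,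
        List.map_cons, List.map_nil]
      congr 1
      · apply List.map_congr_left
        intro s hs
        have hsne : s ≠ pvSport p := by
          intro h; exact hp (by simpa [PySem.Set.mem_ofList, h] using hs)
        have h1 : (pvSport p == s) = false := beq_eq_false_iff_ne.mpr (Ne.symm hsne)
        simp [Function.comp, List.filter, beq_iff_eq, hsne, h1]
      · have hnilf : ps.filter (fun q => pvSport q == pvSport p) = [] := by
          rw [List.filter_eq_nil_iff]
          intro q hq
          simp only [beq_iff_eq]
          intro h
          exact hp (h ▸ List.mem_map_of_mem hq)
        simp [List.filter, hnilf]

-- ===== VERDICT (by name: the statement is the Claim_ definition above) =====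
theorem get_top_props_by_sport_spec : Claim_equal_get_top_props_by_sport := by
  intro props limit _ _
  unfold Spec_get_top_props_by_sport get_top_props_by_sport get_top_props_by_sport_alt
  rw [pv_foldA_eq, List.map_map]
  rfl
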